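-- pv_equiv track=rewrite | github.com/NobuyukiInoue/LeetCode | Problems/1800_1899/1869_Longer_Contiguous_Segments_of_Ones_than_Zeros/Project_Python3/Longer_Contiguous_Segments_of_Ones_than_Zeros.py | checkZeroOnes3
-- ===== SOURCE A (Python) =====
-- def checkZeroOnes3(s: str) -> bool:
--     # 28ms
--     c0, c1, max_c0, max_c1 = 0, 0, 0, 0
--     for ch in s:
--         if ch == "1":
--             c0 = 0
--             c1 += 1
--             max_c1 = max(max_c1, c1)
--         else:
--             c1 = 0
--             c0 += 1
--             max_c0 = max(max_c0, c0)
--     return max_c1 > max_c0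
-- ===== SOURCE B (Python) =====
-- def checkZeroOnes3(s: str) -> bool:
--     # Build the run structure first (maximal runs of equal key ch=='1'),
--     # then reduce: max run length per key, default 0.
--     runs = []
--     for ch in s:
--         key = ch == "1"
--         if runs and runs[-1][0] == key:
--             runs[-1][1] += 1
--         else:
--             runs.append([key, 1])
--     ones = max((n for k, n in runs if k), default=0)
--     zeros = max((n for k, n in runs if not k), default=0)
--     return ones > zeros
-- ===== Notes on version B (the rewrite author's own statement) =====
-- stated objective: alternative
-- what changed: B first materialises the maximal-run structure of the string (grouping by the predicate ch=='1') and then reduces it to the max run length per key, instead of maintaining per-character run/max accumulators.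
import Mathlib
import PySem

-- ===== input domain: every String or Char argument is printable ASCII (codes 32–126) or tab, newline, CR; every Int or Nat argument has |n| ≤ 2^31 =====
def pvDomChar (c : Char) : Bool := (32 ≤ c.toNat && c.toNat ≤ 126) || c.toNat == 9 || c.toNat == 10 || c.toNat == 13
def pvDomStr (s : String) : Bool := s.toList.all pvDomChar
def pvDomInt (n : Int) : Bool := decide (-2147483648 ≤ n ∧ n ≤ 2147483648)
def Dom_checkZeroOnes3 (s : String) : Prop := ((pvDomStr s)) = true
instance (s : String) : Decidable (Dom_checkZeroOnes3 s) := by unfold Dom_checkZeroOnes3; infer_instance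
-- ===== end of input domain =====

-- B builds the maximal-run structure of s first and then reduces it to per-key maxima;
-- a different decomposition of the same O(n) task (not claimed faster).


-- ===== PORT A =====
-- A's loop: state (c0, c1, max_c0, max_c1), one step per character, then max_c1 > max_c0.
def chkGo : Nat → Nat → Nat → Nat → List Char → Bool
  | _, _, m0, m1, [] => decide (m1 > m0)
  | c0, c1, m0, m1, c :: t =>
    if c == '1' then chkGo 0 (c1 + 1) m0 (max m1 (c1 + 1)) t
    else chkGo (c0 + 1) 0 (max m0 (c0 + 1)) m1 t

def checkZeroOnes3 (s : String) : Bool := chkGo 0 0 0 0 s.toList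

-- ===== PORT B =====
-- B's loop building the run list; the accumulator keeps the list reversed (its head is the
-- current last run, which Python mutates in place), so the finished list is acc.reverse.
def chkRunsRev : List (Bool × Nat) → List Char → List (Bool × Nat)
  | acc, [] => acc
  | acc, c :: t =>
    let k := c == '1'
    match acc with
    | (k', n) :: r => if k' == k then chkRunsRev ((k', n + 1) :: r) t
                      else chkRunsRev ((k, 1) :: (k', n) :: r) t
    | [] => chkRunsRev [(k, 1)] t

-- max((n for k, n in runs if k == b), default=0)
def chkMaxK (b : Bool) : List (Bool × Nat) → Nat
  | [] => 0
  | (k, n) :: r => if k == b then max n (chkMaxK b r) else chkMaxK b r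

def checkZeroOnes3_alt (s : String) : Bool :=
  let runs := (chkRunsRev [] s.toList).reverse
  decide (chkMaxK true runs > chkMaxK false runs)

-- ===== PRECONDITION & SPEC =====
def Spec_checkZeroOnes3 (s : String) (out : Bool) : Prop := out = checkZeroOnes3_alt s
instance (s : String) (out : Bool) : Decidable (Spec_checkZeroOnes3 s out) := by unfold Spec_checkZeroOnes3; infer_instance

-- ===== CLAIM (what is proved, stated in full; the proofs are below) =====
def Claim_equal_checkZeroOnes3 : Prop := ∀ (s : String), Dom_checkZeroOnes3 s → Spec_checkZeroOnes3 s (checkZeroOnes3 s)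

-- ===== LEMMAS AND PROOFS =====

-- Max length of a run of key b in l, with the current run already of length cnt.
def chkAg (b : Bool) : Nat → List Char → Nat
  | _, [] => 0
  | cnt, c :: t => if (c == '1') == b then max (cnt + 1) (chkAg b (cnt + 1) t) else chkAg b 0 t

theorem chkGo_eq (l : List Char) : ∀ c0 c1 m0 m1,
    chkGo c0 c1 m0 m1 l = decide (max m1 (chkAg true c1 l) > max m0 (chkAg false c0 l)) := by
  induction l with
  | nil => intro c0 c1 m0 m1; simp [chkGo, chkAg]
  | cons c t ih =>
    intro c0 c1 m0 m1
    by_cases h : (c == '1') = true <;>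
      simp [chkGo, chkAg, h, ih]

theorem chkMaxK_append (b : Bool) (xs ys : List (Bool × Nat)) :
    chkMaxK b (xs ++ ys) = max (chkMaxK b xs) (chkMaxK b ys) := by
  induction xs with
  | nil => simp [chkMaxK]
  | cons x xs ih =>
    obtain ⟨k, n⟩ := x
    by_cases h : (k == b) = true <;> simp [chkMaxK, h, ih]

theorem chkMaxK_reverse (b : Bool) (xs : List (Bool × Nat)) :
    chkMaxK b xs.reverse = chkMaxK b xs := by
  induction xs with
  | nil => rfl
  | cons x xs ih =>
    obtain ⟨k, n⟩ := x
    rw [List.reverse_cons, chkMaxK_append, ih]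
    by_cases h : (k == b) = true <;> simp [chkMaxK, h] <;> omega

theorem chkRunsRev_inv (b : Bool) (l : List Char) : ∀ k n r,
    chkMaxK b (chkRunsRev ((k, n) :: r) l)
      = max (chkMaxK b ((k, n) :: r)) (chkAg b (if k == b then n else 0) l) := by
  induction l with
  | nil => intro k n r; simp [chkRunsRev, chkAg]
  | cons c t ih =>
    intro k n r
    cases b <;> cases k <;> cases hc : (c == '1') <;>
      simp [chkRunsRev, chkAg, hc, ih, chkMaxK] <;> omega

theorem chkRunsRev_nil (b : Bool) (l : List Char) :
    chkMaxK b (chkRunsRev [] l) = chkAg b 0 l := by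
  cases l with
  | nil => simp [chkRunsRev, chkAg, chkMaxK]
  | cons c t =>
    show chkMaxK b (chkRunsRev [((c == '1'), 1)] t) = _
    rw [chkRunsRev_inv]
    cases b <;> cases hc : (c == '1') <;> simp [chkAg, chkMaxK, hc]

-- ===== VERDICT (by name: the statement is the Claim_ definition above) =====
theorem checkZeroOnes3_spec : Claim_equal_checkZeroOnes3 := by
  intro s _
  show chkGo 0 0 0 0 s.toList
      = decide (chkMaxK true ((chkRunsRev [] s.toList).reverse)
          > chkMaxK false ((chkRunsRev [] s.toList).reverse))
  rw [chkGo_eq, chkMaxK_reverse, chkMaxK_reverse, chkRunsRev_nil, chkRunsRev_nil]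
  simp
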